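-- pv_equiv track=rewrite | github.com/EkaterinaPikhovkina/taxonomy-backend | utils/graphdb_utils.py | get_preferred_label
-- ===== SOURCE A (Python) =====
-- def parse_concat_results(concat_string):
--     """Parses GROUP_CONCAT results like 'value1|lang1||value2|lang2'."""
--     results = []
--     if not concat_string or not concat_string.strip():
--         return results
--     pairs = concat_string.split('||')
--     for pair in pairs:
--         parts = pair.split('|', 1) # Split only once
--         if len(parts) == 2:
--             value, lang = parts
--             results.append({"value": value, "lang": lang if lang else None})
--         elif len(parts) == 1: # Handle case with value but no language tag
--              results.append({"value": parts[0], "lang": None})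
--     # Remove duplicates if necessary (SPARQL GROUP_CONCAT DISTINCT should handle this)
--     # unique_results = { (item['value'], item['lang']): item for item in results }.values()
--     # return list(unique_results)
--     return results
--
-- def get_preferred_label(labels_info, preferred_lang="uk"):
--     """Gets the preferred language label, falls back to others or URI part."""
--     if not labels_info:
--         return None
--     labels = parse_concat_results(labels_info)
--     for label in labels:
--         if label["lang"] == preferred_lang:
--             return label["value"]
--     # Fallback: first available label or None
--     return labels[0]["value"] if labels else None
-- ===== SOURCE B (Python) =====
-- def get_preferred_label(labels_info, preferred_lang="uk"):
--     """Single fused pass over the separator-delimited pieces: return the value whose language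
--     matches preferred_lang, else the first value, else None (blank input)."""
--     if not labels_info or not labels_info.strip():
--         return None
--     pairs = labels_info.split('||')
--     for pair in pairs:
--         parts = pair.split('|', 1)
--         if len(parts) == 2 and parts[1] and parts[1] == preferred_lang:
--             return parts[0]
--     return pairs[0].split('|', 1)[0]
-- ===== Notes on version B (the rewrite author's own statement) =====
-- stated objective: simpler
-- what changed: B fuses A's build-a-list-of-dicts helper plus two scans (match scan, fallback indexing) into one direct pass over the separator-delimited pieces with an early return, deriving the fallback straight from the first piece.
import Mathlib
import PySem

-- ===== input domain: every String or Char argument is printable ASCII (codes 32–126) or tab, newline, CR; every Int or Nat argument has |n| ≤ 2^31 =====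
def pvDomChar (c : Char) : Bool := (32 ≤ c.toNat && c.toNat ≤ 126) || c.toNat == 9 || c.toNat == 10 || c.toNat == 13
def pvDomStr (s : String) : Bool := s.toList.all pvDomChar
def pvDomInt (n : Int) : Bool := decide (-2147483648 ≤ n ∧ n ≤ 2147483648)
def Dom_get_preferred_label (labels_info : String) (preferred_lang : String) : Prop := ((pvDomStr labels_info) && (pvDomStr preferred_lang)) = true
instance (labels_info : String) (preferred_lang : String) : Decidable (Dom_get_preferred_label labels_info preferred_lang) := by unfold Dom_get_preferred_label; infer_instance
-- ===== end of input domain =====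

-- B fuses A's list-of-dicts construction plus two scans into one pass over the separator-delimited pieces (equal return values; no claim about speed).

-- ===== PORT A =====
-- parse_concat_results: the dicts {"value":…, "lang":…} become pairs (value, lang : Option String)
def parse_concat_results (concat_string : String) : List (String × Option String) :=
  if concat_string == "" || PySem.Str.strip concat_string == "" then []
  else
    let pairs := (PySem.Str.split? concat_string "||").getD []
    pairs.foldl (fun results pair =>
      let parts := (PySem.Str.splitMax? pair "|" 1).getD []
      match parts with
      | [value, lang] => results ++ [(value, if lang ≠ "" then some lang else none)]
      | [value] => results ++ [(value, none)]
      | _ => results) []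

def get_preferred_label (labels_info : String) (preferred_lang : String) : Option String :=
  if labels_info == "" then none
  else
    let labels := parse_concat_results labels_info
    match labels.find? (fun label => label.2 == some preferred_lang) with
    | some label => some label.1
    | none =>
      match labels with
      | label :: _ => some label.1
      | [] => none

-- ===== PORT B =====
-- the for-loop of Source B with its early return
def pvAltLoop (preferred_lang : String) : List String → Option String
  | [] => none
  | pair :: rest =>
    let parts := (PySem.Str.splitMax? pair "|" 1).getD []
    if parts.length == 2 && parts.getD 1 "" != "" && parts.getD 1 "" == preferred_lang
    then some (parts.getD 0 "")
    else pvAltLoop preferred_lang rest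

def get_preferred_label_alt (labels_info : String) (preferred_lang : String) : Option String :=
  if labels_info == "" || PySem.Str.strip labels_info == "" then none
  else
    let pairs := (PySem.Str.split? labels_info "||").getD []
    match pvAltLoop preferred_lang pairs with
    | some v => some v
    | none => some (((PySem.Str.splitMax? (pairs.headD "") "|" 1).getD []).headD "")

-- ===== PRECONDITION & SPEC =====
def Spec_get_preferred_label (labels_info : String) (preferred_lang : String) (out : Option String) : Prop := out = get_preferred_label_alt labels_info preferred_lang
instance (labels_info : String) (preferred_lang : String) (out : Option String) : Decidable (Spec_get_preferred_label labels_info preferred_lang out) := by unfold Spec_get_preferred_label; infer_instance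

-- ===== CLAIM (what is proved, stated in full; the proofs are below) =====
def Claim_equal_get_preferred_label : Prop := ∀ (labels_info : String) (preferred_lang : String), Dom_get_preferred_label labels_info preferred_lang → Spec_get_preferred_label labels_info preferred_lang (get_preferred_label labels_info preferred_lang)

-- ===== LEMMAS AND PROOFS =====

-- splitOnMax.go emits between acc.length+1 and acc.length+m+1 pieces
lemma pvGoMaxLen (sep : List Char) (fuel : Nat) : ∀ (m : Nat) (l cur : List Char) (acc : List (List Char)),
    acc.length + 1 ≤ (PySem.Chars.splitOnMax.go sep fuel m l cur acc).length ∧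
    (PySem.Chars.splitOnMax.go sep fuel m l cur acc).length ≤ acc.length + m + 1 := by
  induction fuel with
  | zero => intro m l cur acc; rw [PySem.Chars.splitOnMax.go]; simp
  | succ fuel ih =>
    intro m l cur acc
    cases l with
    | nil => rw [PySem.Chars.splitOnMax.go]; simp; omega
    | cons c rest =>
      rw [PySem.Chars.splitOnMax.go]
      split_ifs with h1 h2
      · simp
      · have := ih (m-1) (List.drop sep.length (c::rest)) [] (cur.reverse :: acc)
        simp at this ⊢; omega
      · have := ih m rest (c :: cur) acc
        omega

-- splitOn.go never returns the empty list
lemma pvGoNeNil (sep : List Char) (fuel : Nat) : ∀ (l cur : List Char) (acc : List (List Char)),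
    PySem.Chars.splitOn.go sep fuel l cur acc ≠ [] := by
  induction fuel with
  | zero => intro l cur acc; rw [PySem.Chars.splitOn.go]; simp
  | succ fuel ih =>
    intro l cur acc
    cases l with
    | nil => rw [PySem.Chars.splitOn.go]; simp; omega
    | cons c rest =>
      rw [PySem.Chars.splitOn.go]
      split_ifs with h1
      · exact ih _ _ _
      · exact ih _ _ _

-- shape of pair.split('|', 1): exactly one or two pieces
lemma pvPartsShape (pair : String) :
    (∃ v, (PySem.Str.splitMax? pair "|" 1).getD [] = [v]) ∨
    (∃ v l, (PySem.Str.splitMax? pair "|" 1).getD [] = [v, l]) := by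
  have hlen : 1 ≤ (PySem.Chars.splitOnMax pair.toList "|".toList 1).length ∧
      (PySem.Chars.splitOnMax pair.toList "|".toList 1).length ≤ 2 := by
    unfold PySem.Chars.splitOnMax
    rw [if_neg (by omega)]
    have := pvGoMaxLen "|".toList (pair.toList.length + 1) (Int.toNat 1) pair.toList [] []
    simpa using this
  unfold PySem.Str.splitMax? PySem.Chars.splitMax?
  rw [if_neg (by simp)]
  rcases hp : PySem.Chars.splitOnMax pair.toList "|".toList 1 with _ | ⟨a, _ | ⟨b, t⟩⟩
  · rw [hp] at hlen; simp at hlen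
  · left; exact ⟨String.ofList a, by simp⟩
  · rw [hp] at hlen
    have : t = [] := by simp at hlen; omega
    subst this
    right; exact ⟨String.ofList a, String.ofList b, by simp⟩

-- the single entry each '||' piece contributes to A's list
def pvEntry (pair : String) : String × Option String :=
  let parts := (PySem.Str.splitMax? pair "|" 1).getD []
  (parts.headD "", match parts with | [_, l] => if l ≠ "" then some l else none | _ => none)

lemma pvFoldEqMap (pairs : List String) (acc : List (String × Option String)) :
    pairs.foldl (fun results pair =>
      let parts := (PySem.Str.splitMax? pair "|" 1).getD []
      match parts with
      | [value, lang] => results ++ [(value, if lang ≠ "" then some lang else none)]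
      | [value] => results ++ [(value, none)]
      | _ => results) acc = acc ++ pairs.map pvEntry := by
  induction pairs generalizing acc with
  | nil => simp
  | cons p rest ih =>
    rcases pvPartsShape p with ⟨v, hp⟩ | ⟨v, l, hp⟩ <;>
      simp only [List.foldl, List.map, hp, ih, pvEntry] <;> simp

lemma pvScanEq (pl : String) (pairs : List String) :
    pvAltLoop pl pairs = ((pairs.map pvEntry).find? (fun lb => lb.2 == some pl)).map (·.1) := by
  induction pairs with
  | nil => simp [pvAltLoop]
  | cons p rest ih =>
    rw [pvAltLoop]
    rcases pvPartsShape p with ⟨v, hp⟩ | ⟨v, l, hp⟩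
    · simp only [hp, List.map, List.find?, pvEntry]
      simp [ih]
    · simp only [hp, List.map, List.find?, pvEntry]
      by_cases hl : l = ""
      · subst hl; simp [ih]
      · by_cases hpl : l = pl
        · subst hpl; simp [hl]
        · have hb : (l == pl) = false := by simp [hpl]
          simp [hl, hb, ih, Option.map_map]

-- ===== VERDICT (by name: the statement is the Claim_ definition above) =====
theorem get_preferred_label_spec : Claim_equal_get_preferred_label := by
  intro labels_info preferred_lang _
  unfold Spec_get_preferred_label get_preferred_label get_preferred_label_alt parse_concat_results
  by_cases h0 : labels_info = ""
  · subst h0; simp [PySem.Str.strip, PySem.Chars.strip, PySem.Chars.lstrip, PySem.Chars.rstrip]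
  · rw [if_neg (by simpa using h0)]
    by_cases hs : PySem.Str.strip labels_info = ""
    · simp [hs]
    · rw [if_neg (by simp [h0, hs]), if_neg (by simp [h0, hs])]
      simp only [pvFoldEqMap, pvScanEq, List.nil_append]
      have hpairs : (PySem.Str.split? labels_info "||").getD [] ≠ [] := by
        unfold PySem.Str.split? PySem.Chars.split?
        rw [if_neg (by simp)]
        unfold PySem.Chars.splitOn
        simp [pvGoNeNil]
      rcases hp : (PySem.Str.split? labels_info "||").getD [] with _ | ⟨p, rest⟩
      · exact absurd hp hpairs
      · rcases hf : ((p :: rest).map pvEntry).find? (fun lb => lb.2 == some preferred_lang) with _ | lb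
        · simp only [hf]
          rcases pvPartsShape p with ⟨v, hq⟩ | ⟨v, l, hq⟩ <;> simp [hq, pvEntry]
        · simp only [hf]
          simp
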